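-- pv_equiv track=rewrite | github.com/emreds/tum-dlr-automl-for-eo | src/tum_dlr_automl_for_eo/pairwise_matrix/encode_matrix.py | _rename_ops
-- ===== SOURCE A (Python) =====
-- from typing import List
--
-- CONV3X3 = 'conv3x3-bn-relu'
--
-- CONV1X1 = 'conv1x1-bn-relu'
--
-- MAXPOOL3X3 = 'maxpool3x3'
--
-- def _rename_ops(ops: List[str]) -> List[str]:
--     """
--     Converts the given operations to the CODING format.
--
--     Args:
--         ops (List[str]): _description_
--
--     Returns:
--         List[str]: _description_
--     """
--     c1x1 = 0
--     c3x3 = 0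
--     mp3x3 = 0
--     new_ops = []
--     for op in ops:
--         if op == CONV1X1:
--             new_ops = new_ops + [op + "_" + str(c1x1)]
--             c1x1 = c1x1 + 1
--         elif op == CONV3X3:
--             new_ops = new_ops + [op + "_" + str(c3x3)]
--             c3x3 = c3x3 + 1
--         elif op == MAXPOOL3X3:
--             new_ops = new_ops + [op + "_" + str(mp3x3)]
--             mp3x3 = mp3x3 + 1
--         else:
--             new_ops = new_ops + [op]
--     return new_ops
-- ===== SOURCE B (Python) =====
-- from typing import List
--
-- CONV3X3 = 'conv3x3-bn-relu'
--
-- CONV1X1 = 'conv1x1-bn-relu'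
--
-- MAXPOOL3X3 = 'maxpool3x3'
--
-- TRACKED = (CONV1X1, CONV3X3, MAXPOOL3X3)
--
-- def _rename_ops(ops: List[str]) -> List[str]:
--     # stateless: the suffix index of a tracked op at position i is simply
--     # the number of earlier occurrences of the same op, ops[:i].count(op)
--     return [op + "_" + str(ops[:i].count(op)) if op in TRACKED else op
--             for i, op in enumerate(ops)]
-- ===== Notes on version B (the rewrite author's own statement) =====
-- stated objective: alternative
-- what changed: Replaces A's stateful single pass (three running counters, if/elif chain, repeated list concatenation) with a stateless comprehension that computes each element independently from a closed form: a tracked op at index i gets suffix ops[:i].count(op).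
import Mathlib
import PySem

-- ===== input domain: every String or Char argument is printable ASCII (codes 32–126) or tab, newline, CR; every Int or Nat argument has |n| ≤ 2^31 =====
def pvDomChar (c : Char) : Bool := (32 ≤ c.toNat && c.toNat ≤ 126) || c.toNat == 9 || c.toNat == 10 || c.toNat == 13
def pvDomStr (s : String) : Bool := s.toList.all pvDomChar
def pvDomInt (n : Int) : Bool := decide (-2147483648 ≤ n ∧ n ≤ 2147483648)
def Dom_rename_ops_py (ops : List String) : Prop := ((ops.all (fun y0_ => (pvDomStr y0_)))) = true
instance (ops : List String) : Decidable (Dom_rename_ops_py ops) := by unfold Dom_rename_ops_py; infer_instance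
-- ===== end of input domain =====

-- B replaces A's stateful pass (three running counters, if/elif) with a stateless
-- comprehension: element i is op + "_" + str(ops[:i].count(op)) for tracked ops
-- (objective: alternative); return values proved equal on all inputs.

def pvCONV3X3 : String := "conv3x3-bn-relu"
def pvCONV1X1 : String := "conv1x1-bn-relu"
def pvMAXPOOL3X3 : String := "maxpool3x3"

-- ===== PORT A =====
-- literal transliteration of A: three counters, if/elif chain, new_ops = new_ops + [...]
def pvStepA (s : Int × Int × Int × List String) (op : String) : Int × Int × Int × List String :=
  let (c1x1, c3x3, mp3x3, new_ops) := s
  if op = pvCONV1X1 then (c1x1 + 1, c3x3, mp3x3, new_ops ++ [op ++ "_" ++ PySem.Int.toStr c1x1])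
  else if op = pvCONV3X3 then (c1x1, c3x3 + 1, mp3x3, new_ops ++ [op ++ "_" ++ PySem.Int.toStr c3x3])
  else if op = pvMAXPOOL3X3 then (c1x1, c3x3, mp3x3 + 1, new_ops ++ [op ++ "_" ++ PySem.Int.toStr mp3x3])
  else (c1x1, c3x3, mp3x3, new_ops ++ [op])

def rename_ops_py (ops : List String) : List String :=
  (ops.foldl pvStepA (0, 0, 0, [])).2.2.2

-- ===== PORT B =====
-- literal transliteration of B: 'op in TRACKED' is the or-chain over the tuple;
-- ops[:i].count(op) is PySem.List.count (PySem.List.slice ops none (some i)) op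
def rename_ops_py_alt (ops : List String) : List String :=
  (PySem.List.enumerate ops 0).map (fun p =>
    if p.2 = pvCONV1X1 ∨ p.2 = pvCONV3X3 ∨ p.2 = pvMAXPOOL3X3 then
      p.2 ++ "_" ++ PySem.Int.toStr ((PySem.List.count (PySem.List.slice ops none (some p.1)) p.2 : Nat) : Int)
    else p.2)

-- ===== PRECONDITION & SPEC =====
def Spec_rename_ops_py (ops : List String) (out : List String) : Prop := out = rename_ops_py_alt ops
instance (ops : List String) (out : List String) : Decidable (Spec_rename_ops_py ops out) := by unfold Spec_rename_ops_py; infer_instance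

-- ===== CLAIM =====
def Claim_equal_rename_ops_py : Prop := ∀ (ops : List String), Dom_rename_ops_py ops → Spec_rename_ops_py ops (rename_ops_py ops)

-- ===== LEMMAS AND PROOFS =====

-- B on a snoc: all earlier prefixes are unchanged, and the new element's prefix is ops itself
theorem pv_alt_snoc (ops : List String) (op : String) :
    rename_ops_py_alt (ops ++ [op]) =
      rename_ops_py_alt ops ++
        [if op = pvCONV1X1 ∨ op = pvCONV3X3 ∨ op = pvMAXPOOL3X3 then
           op ++ "_" ++ PySem.Int.toStr ((ops.count op : Nat) : Int)
         else op] := by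
  unfold rename_ops_py_alt
  rw [PySem.List.enumerate_append, List.map_append]
  congr 1
  · apply List.map_congr_left
    intro p hp
    rcases (PySem.List.mem_enumerate_iff _ _ _).1 hp with ⟨k, hk, rfl⟩
    simp only [zero_add]
    rw [show ((k : Int)) = ((k : Nat) : Int) from rfl,
        PySem.List.slice_to_natCast, PySem.List.slice_to_natCast,
        List.take_append_of_le_length (le_of_lt hk)]
  · simp [PySem.List.enumerate, PySem.List.slice_to_natCast, List.take_left',
          PySem.List.count_eq]

-- the unrolled invariant: A's fold state is the three prefix counts and B's output
theorem pv_unroll (ops : List String) :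
    ops.foldl pvStepA (0, 0, 0, []) =
      (((ops.count pvCONV1X1 : Nat) : Int), ((ops.count pvCONV3X3 : Nat) : Int),
       ((ops.count pvMAXPOOL3X3 : Nat) : Int), rename_ops_py_alt ops) := by
  induction ops using List.reverseRecOn with
  | nil => simp [rename_ops_py_alt, PySem.List.enumerate]
  | append_singleton ops op ih =>
    rw [List.foldl_append, ih, pv_alt_snoc]
    by_cases e1 : op = pvCONV1X1
    · subst e1; simp [pvStepA, pvCONV1X1, pvCONV3X3, pvMAXPOOL3X3]
    · by_cases e3 : op = pvCONV3X3
      · subst e3; simp [pvStepA, pvCONV1X1, pvCONV3X3, pvMAXPOOL3X3]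
      · by_cases em : op = pvMAXPOOL3X3
        · subst em; simp [pvStepA, pvCONV1X1, pvCONV3X3, pvMAXPOOL3X3]
        · simp [pvStepA, e1, e3, em, List.count_eq_zero_of_not_mem]

-- ===== VERDICT =====
theorem rename_ops_py_spec : Claim_equal_rename_ops_py := by
  intro ops _
  unfold Spec_rename_ops_py rename_ops_py
  rw [pv_unroll]
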